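-- pv_equiv track=rewrite | github.com/rdranch/scripts | DiscordPythonBot.py | add
-- ===== SOURCE A (Python) =====
-- def add(last_message, user):
--   s = ""
--   try:
--     new_lst = last_message.split("\n")
--     new_lst.append(user)
--     for n in new_lst:
--       s += (n + "\n")
--     return s
--   except:
--     return user
-- ===== SOURCE B (Python) =====
-- def add(last_message, user):
--   try:
--     return last_message + "\n" + user + "\n"
--   except:
--     return user
-- ===== Notes on version B (the rewrite author's own statement) =====
-- stated objective: simpler
-- what changed: Splitting on '\n' and re-joining each piece with '\n' is the identity plus a trailing newline, so the split/append/loop collapses to the closed-form concatenation last_message + '\n' + user + '\n'.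
import Mathlib
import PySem

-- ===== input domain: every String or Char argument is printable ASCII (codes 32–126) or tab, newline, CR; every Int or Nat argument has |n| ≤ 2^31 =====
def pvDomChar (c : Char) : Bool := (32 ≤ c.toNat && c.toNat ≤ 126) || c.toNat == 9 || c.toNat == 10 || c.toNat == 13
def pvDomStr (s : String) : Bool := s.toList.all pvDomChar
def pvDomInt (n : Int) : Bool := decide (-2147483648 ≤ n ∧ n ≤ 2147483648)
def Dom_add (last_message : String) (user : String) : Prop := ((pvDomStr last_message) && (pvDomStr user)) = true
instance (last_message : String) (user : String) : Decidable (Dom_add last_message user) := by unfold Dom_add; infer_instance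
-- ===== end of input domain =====

-- B replaces A's split/append/rejoin loop with the closed-form concatenation last_message + "\n" + user + "\n" (simpler; return value only — neither mutates its arguments).

-- ===== PORT A =====
-- A: split last_message on "\n", append user, then re-join each piece followed by "\n" in a loop.
-- The try/except never fires on string inputs, so the port is the try-branch.
def add (last_message : String) (user : String) : String :=
  let new_lst := PySem.Chars.splitOn last_message.toList ['\n'] ++ [user.toList]
  String.mk (new_lst.foldl (fun s n => s ++ (n ++ ['\n'])) [])

-- ===== PORT B =====
def add_alt (last_message : String) (user : String) : String :=
  String.mk (last_message.toList ++ '\n' :: (user.toList ++ ['\n']))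

-- ===== PRECONDITION & SPEC =====
def Spec_add (last_message : String) (user : String) (out : String) : Prop := out = add_alt last_message user
instance (last_message : String) (user : String) (out : String) : Decidable (Spec_add last_message user out) := by unfold Spec_add; infer_instance

-- ===== CLAIM (what is proved, stated in full; the proofs are below) =====
def Claim_equal_add : Prop := ∀ (last_message : String) (user : String), Dom_add last_message user → Spec_add last_message user (add last_message user)

-- ===== LEMMAS AND PROOFS =====

-- A's loop over a list of pieces is the flatMap that appends '\n' after each piece.
theorem add_foldl_eq_flatMap (parts : List (List Char)) :
    parts.foldl (fun s n => s ++ (n ++ ['\n'])) [] = parts.flatMap (fun n => n ++ ['\n']) := by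
  have h : ∀ (parts : List (List Char)) (s : List Char),
      parts.foldl (fun s n => s ++ (n ++ ['\n'])) s = s ++ parts.flatMap (fun n => n ++ ['\n']) := by
    intro parts
    induction parts with
    | nil => intro s; simp
    | cons p ps ih => intro s; simp [List.foldl_cons, ih, List.flatMap_cons]
  simpa using h parts []

-- splitOn.go invariant: re-joining every produced piece with a trailing '\n' rebuilds the input.
theorem add_go_flatMap (fuel : Nat) :
    ∀ (l cur : List Char) (accs : List (List Char)), l.length ≤ fuel →
      (PySem.Chars.splitOn.go ['\n'] fuel l cur accs).flatMap (fun n => n ++ ['\n']) =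
        accs.reverse.flatMap (fun n => n ++ ['\n']) ++ cur.reverse ++ l ++ ['\n'] := by
  induction fuel with
  | zero =>
    intro l cur accs hl
    have : l = [] := List.eq_nil_of_length_eq_zero (Nat.le_zero.mp hl)
    subst this
    simp [PySem.Chars.splitOn.go]
  | succ f ih =>
    intro l cur accs hl
    cases l with
    | nil => simp [PySem.Chars.splitOn.go]
    | cons c rest =>
      by_cases hc : c = '\n'
      · subst hc
        have hpre : List.isPrefixOf ['\n'] ('\n' :: rest) = true := by
          simp [List.isPrefixOf]
        rw [PySem.Chars.splitOn.go]
        simp only [hpre, if_true]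
        have hr : rest.length ≤ f := by simpa using Nat.succ_le_succ_iff.mp hl
        rw [show List.drop (['\n'] : List Char).length ('\n' :: rest) = rest by simp]
        rw [ih rest [] (cur.reverse :: accs) hr]
        simp
      · have hpre : List.isPrefixOf ['\n'] (c :: rest) = false := by
          simp only [List.isPrefixOf, Bool.and_eq_false_iff, beq_eq_false_iff_ne, ne_eq]
          exact Or.inl fun h => hc h.symm
        rw [PySem.Chars.splitOn.go]
        simp only [hpre, Bool.false_eq_true, if_false]
        have hr : rest.length ≤ f := by simpa using Nat.succ_le_succ_iff.mp hl
        rw [ih rest (c :: cur) accs hr]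
        simp

theorem add_split_rebuild (cs : List Char) :
    (PySem.Chars.splitOn cs ['\n']).flatMap (fun n => n ++ ['\n']) = cs ++ ['\n'] := by
  unfold PySem.Chars.splitOn
  simpa using add_go_flatMap (cs.length + 1) cs [] [] (by omega)

-- ===== VERDICT (by name: the statement is the Claim_ definition above) =====
theorem add_spec : Claim_equal_add := by
  intro last_message user _
  unfold Spec_add add add_alt
  simp only [add_foldl_eq_flatMap, List.flatMap_append, List.flatMap_cons, List.flatMap_nil,
    add_split_rebuild, List.append_nil]
  simp
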